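-- pv_equiv track=rewrite | github.com/SoneyBoney/advent_of_code_2022 | day24/day24.py | create_graph_masks
-- ===== SOURCE A (Python) =====
-- from typing import List, Set, Tuple
--
-- def create_graph_masks(board: List[str]) -> List[Set[Tuple[int,int]]]:
--     ret = []
--     width = len(board[0]) - 2
--     height = len(board) - 2
--     for time in range(width*height +1):
--         temp_mask = set()
--         for y,line in enumerate(board):
--             for x,elem in enumerate(line):
--                 if elem == '#':
--                     temp_mask.add((x,y))
--                 elif elem == '>': # we know where the blizzard is at each time step, exlude #s
--                     temp_mask.add((1+(x+time-1)%width, y))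
--                 elif elem == '<':
--                     temp_mask.add((1+(x-time-1)%width, y))
--                 elif elem == '^': # y is the index into the rows, so up is -1
--                     temp_mask.add((x,1+(y-time-1)%height))
--                 elif elem == 'v':
--                     temp_mask.add((x,1+(y+time-1)%height))
--         ret.append(temp_mask)
--     return ret
-- ===== SOURCE B (Python) =====
-- from typing import List, Set, Tuple
--
-- def _step(c, x, y, width, height):
--     # move one blizzard a single cell with cyclic wraparound
--     if c == '>':
--         return (c, 1 + x % width, y)
--     if c == '<':
--         return (c, 1 + (x - 2) % width, y)
--     if c == '^':
--         return (c, x, 1 + (y - 2) % height)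
--     if c == 'v':
--         return (c, x, 1 + y % height)
--     return (c, x, y)
--
-- def create_graph_masks(board: List[str]) -> List[Set[Tuple[int,int]]]:
--     width = len(board[0]) - 2
--     height = len(board) - 2
--     # parse once, normalising every blizzard to its time-0 cell
--     cells = []
--     for y, line in enumerate(board):
--         for x, c in enumerate(line):
--             if c == '#':
--                 cells.append((c, x, y))
--             elif c in '><':
--                 cells.append((c, 1 + (x - 1) % width, y))
--             elif c in '^v':
--                 cells.append((c, x, 1 + (y - 1) % height))
--     ret = []
--     for _ in range(width * height + 1):
--         ret.append({(x, y) for _, x, y in cells})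
--         cells = [_step(c, x, y, width, height) for c, x, y in cells]
--     return ret
-- ===== Notes on version B (the rewrite author's own statement) =====
-- stated objective: alternative
-- what changed: B parses the board once into a list of cells (walls and blizzards normalised to their time-0 positions) and then SIMULATES: each time step it advances every blizzard one cell with cyclic wraparound and snapshots the set, instead of A's re-scanning the whole board every step and recomputing each position with a closed-form modular formula in the time variable.
import Mathlib
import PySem

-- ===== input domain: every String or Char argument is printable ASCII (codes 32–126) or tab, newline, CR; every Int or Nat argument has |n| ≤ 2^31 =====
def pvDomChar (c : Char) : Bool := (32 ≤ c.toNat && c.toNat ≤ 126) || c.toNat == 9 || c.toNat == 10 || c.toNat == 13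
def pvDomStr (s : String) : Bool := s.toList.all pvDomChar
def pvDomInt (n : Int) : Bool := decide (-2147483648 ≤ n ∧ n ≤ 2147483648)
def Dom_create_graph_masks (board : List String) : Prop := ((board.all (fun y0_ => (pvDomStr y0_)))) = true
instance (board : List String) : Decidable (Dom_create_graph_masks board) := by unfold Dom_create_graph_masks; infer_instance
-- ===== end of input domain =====

-- B replaces A's per-time closed-form recomputation from the whole board by an incremental
-- simulation: parse once into a list of cells (walls, and blizzards at their time-0
-- positions), then advance every blizzard one cell per time step (alternative decomposition).

-- ===== PORT A =====
-- Literal transliteration of A: for each time in range(width*height+1), scan every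
-- character of the board and add the (possibly shifted) coordinate to a fresh set.
-- board[0] is ported as pyGetD board 0 "" (Pre_ excludes the empty board where Python raises).
def create_graph_masks (board : List String) : List (List (Int × Int)) :=
  let width : Int := PySem.Str.len (PySem.List.pyGetD board 0 "") - 2
  let height : Int := (board.length : Int) - 2
  (PySem.List.pyRange 0 (width * height + 1) 1).foldl (fun ret time =>
    ret ++ [(PySem.List.enumerate board 0).foldl (fun mask yline =>
      (PySem.List.enumerate yline.2.toList 0).foldl (fun mask xe =>
        if xe.2 = '#' then mask.add (xe.1, yline.1)
        else if xe.2 = '>' then mask.add (1 + PySem.Int.mod (xe.1 + time - 1) width, yline.1)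
        else if xe.2 = '<' then mask.add (1 + PySem.Int.mod (xe.1 - time - 1) width, yline.1)
        else if xe.2 = '^' then mask.add (xe.1, 1 + PySem.Int.mod (yline.1 - time - 1) height)
        else if xe.2 = 'v' then mask.add (xe.1, 1 + PySem.Int.mod (yline.1 + time - 1) height)
        else mask) mask) (PySem.Set.empty : PySem.Set (Int × Int))]) []

-- ===== PORT B =====
-- move one blizzard a single cell with cyclic wraparound (Source B's _step)
def cgm_step (width height : Int) (e : Char × Int × Int) : Char × Int × Int :=
  if e.1 = '>' then (e.1, 1 + PySem.Int.mod e.2.1 width, e.2.2)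
  else if e.1 = '<' then (e.1, 1 + PySem.Int.mod (e.2.1 - 2) width, e.2.2)
  else if e.1 = '^' then (e.1, e.2.1, 1 + PySem.Int.mod (e.2.2 - 2) height)
  else if e.1 = 'v' then (e.1, e.2.1, 1 + PySem.Int.mod e.2.2 height)
  else e

-- one-time parse, normalising every blizzard to its time-0 cell (Source B's parse loop)
def cgm_cells0 (board : List String) (width height : Int) : List (Char × Int × Int) :=
  (PySem.List.enumerate board 0).flatMap (fun yl =>
    (PySem.List.enumerate yl.2.toList 0).filterMap (fun xe =>
      if xe.2 = '#' then some (xe.2, xe.1, yl.1)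
      else if xe.2 = '>' ∨ xe.2 = '<' then some (xe.2, 1 + PySem.Int.mod (xe.1 - 1) width, yl.1)
      else if xe.2 = '^' ∨ xe.2 = 'v' then some (xe.2, xe.1, 1 + PySem.Int.mod (yl.1 - 1) height)
      else none))

def create_graph_masks_alt (board : List String) : List (List (Int × Int)) :=
  let width : Int := PySem.Str.len (PySem.List.pyGetD board 0 "") - 2
  let height : Int := (board.length : Int) - 2
  ((PySem.List.pyRange 0 (width * height + 1) 1).foldl (fun st _ =>
    (st.1 ++ [st.2.foldl (fun m e => PySem.Set.add m (e.2.1, e.2.2))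
        (PySem.Set.empty : PySem.Set (Int × Int))],
     st.2.map (cgm_step width height))) ([], cgm_cells0 board width height)).1

-- ===== PRECONDITION & SPEC =====
-- Pre_ excludes exactly the inputs where Python A raises: the empty board (IndexError on
-- board[0]), and boards whose interior width (resp. height) is 0 while a '>'/'<'
-- (resp. '^'/'v') occurs, where '% 0' raises ZeroDivisionError.
def Pre_create_graph_masks (board : List String) : Prop :=
  board ≠ [] ∧
  (PySem.Str.len (board.headD "") = 2 → ∀ s ∈ board, '>' ∉ s.toList ∧ '<' ∉ s.toList) ∧
  (board.length = 2 → ∀ s ∈ board, '^' ∉ s.toList ∧ 'v' ∉ s.toList)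
instance (board : List String) : Decidable (Pre_create_graph_masks board) := by
  unfold Pre_create_graph_masks; infer_instance

def pvWitness_create_graph_masks : List String := ["####", "#>v#", "#..#", "####"]

def Spec_create_graph_masks (board : List String) (out : List (List (Int × Int))) : Prop := out = create_graph_masks_alt board
instance (board : List String) (out : List (List (Int × Int))) : Decidable (Spec_create_graph_masks board out) := by unfold Spec_create_graph_masks; infer_instance

-- ===== CLAIM (what is proved, stated in full; the proofs are below) =====
def Claim_equal_create_graph_masks : Prop := ∀ (board : List String), Dom_create_graph_masks board → Pre_create_graph_masks board → Spec_create_graph_masks board (create_graph_masks board)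

-- ===== LEMMAS AND PROOFS =====

-- the position A's closed-form formula assigns at time t to the source cell e
def cgm_posA (width height t : Int) (e : Char × Int × Int) : Char × Int × Int :=
  if e.1 = '#' then e
  else if e.1 = '>' then (e.1, 1 + PySem.Int.mod (e.2.1 + t - 1) width, e.2.2)
  else if e.1 = '<' then (e.1, 1 + PySem.Int.mod (e.2.1 - t - 1) width, e.2.2)
  else if e.1 = '^' then (e.1, e.2.1, 1 + PySem.Int.mod (e.2.2 - t - 1) height)
  else if e.1 = 'v' then (e.1, e.2.1, 1 + PySem.Int.mod (e.2.2 + t - 1) height)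
  else e

-- the source cells A's scan reacts to, in scan order
def cgm_events (board : List String) : List (Char × Int × Int) :=
  (PySem.List.enumerate board 0).flatMap (fun yl =>
    ((PySem.List.enumerate yl.2.toList 0).filter
      (fun xe => (['#', '>', '<', '^', 'v'] : List Char).contains xe.2)).map
      (fun xe => (xe.2, xe.1, yl.1)))

-- a residue may be taken before or after shifting by ±1 (Int.fmod congruence, every divisor)
theorem cgm_mod_shift1 (a w : Int) :
    PySem.Int.mod (1 + PySem.Int.mod a w) w = PySem.Int.mod (1 + a) w := by
  simp only [PySem.Int.mod]
  rw [Int.add_fmod, Int.fmod_fmod_of_dvd _ dvd_rfl, ← Int.add_fmod]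

theorem cgm_mod_shift2 (a w : Int) :
    PySem.Int.mod (-1 + PySem.Int.mod a w) w = PySem.Int.mod (-1 + a) w := by
  simp only [PySem.Int.mod]
  rw [Int.add_fmod, Int.fmod_fmod_of_dvd _ dvd_rfl, ← Int.add_fmod]

-- one incremental step tracks A's closed form
theorem cgm_step_posA (width height t : Int) (e : Char × Int × Int) :
    cgm_step width height (cgm_posA width height t e) = cgm_posA width height (t + 1) e := by
  obtain ⟨c, x, y⟩ := e
  by_cases h1 : c = '#' <;> by_cases h2 : c = '>' <;> by_cases h3 : c = '<' <;>
    by_cases h4 : c = '^' <;> by_cases h5 : c = 'v' <;>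
    simp [cgm_step, cgm_posA, h1, h2, h3, h4, h5] <;>
    ring_nf <;>
    simp [cgm_mod_shift1, cgm_mod_shift2] <;> ring_nf

-- B's one-time parse is the event list placed at its time-0 positions
theorem cgm_cells0_eq (board : List String) (width height : Int) :
    cgm_cells0 board width height
      = (cgm_events board).map (cgm_posA width height 0) := by
  unfold cgm_cells0 cgm_events
  rw [List.map_flatMap]
  apply List.flatMap_congr
  intro yl _
  rw [List.map_map]
  generalize PySem.List.enumerate yl.2.toList 0 = l
  induction l with
  | nil => simp
  | cons xe rest ih =>
    obtain ⟨x, c⟩ := xe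
    by_cases h1 : c = '#' <;> by_cases h2 : c = '>' <;> by_cases h3 : c = '<' <;>
      by_cases h4 : c = '^' <;> by_cases h5 : c = 'v' <;>
      simp [h1, h2, h3, h4, h5, cgm_posA, ih]

-- one line of A's time-t scan = the adds of that line's events at their time-t positions
theorem cgm_line (width height time y : Int) (line : List Char) (s : Int)
    (mask : PySem.Set (Int × Int)) :
    (PySem.List.enumerate line s).foldl (fun mask xe =>
        if xe.2 = '#' then mask.add (xe.1, y)
        else if xe.2 = '>' then mask.add (1 + PySem.Int.mod (xe.1 + time - 1) width, y)
        else if xe.2 = '<' then mask.add (1 + PySem.Int.mod (xe.1 - time - 1) width, y)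
        else if xe.2 = '^' then mask.add (xe.1, 1 + PySem.Int.mod (y - time - 1) height)
        else if xe.2 = 'v' then mask.add (xe.1, 1 + PySem.Int.mod (y + time - 1) height)
        else mask) mask
    = ((((PySem.List.enumerate line s).filter
        (fun xe => (['#', '>', '<', '^', 'v'] : List Char).contains xe.2)).map
        (fun xe => (xe.2, xe.1, y))).map (cgm_posA width height time)).foldl
      (fun m e => PySem.Set.add m (e.2.1, e.2.2)) mask := by
  induction line generalizing s mask with
  | nil => simp [PySem.List.enumerate_nil]
  | cons c rest ih =>
    rw [PySem.List.enumerate_cons]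
    by_cases h1 : c = '#' <;> by_cases h2 : c = '>' <;> by_cases h3 : c = '<' <;>
      by_cases h4 : c = '^' <;> by_cases h5 : c = 'v' <;>
      simp [h1, h2, h3, h4, h5, List.filter, List.foldl, ih, cgm_posA]

-- A's whole time-t double scan = the adds of all events at their time-t positions
theorem cgm_board (width height time : Int) (board : List String) (s : Int)
    (mask : PySem.Set (Int × Int)) :
    (PySem.List.enumerate board s).foldl (fun mask yline =>
      (PySem.List.enumerate yline.2.toList 0).foldl (fun mask xe =>
        if xe.2 = '#' then mask.add (xe.1, yline.1)
        else if xe.2 = '>' then mask.add (1 + PySem.Int.mod (xe.1 + time - 1) width, yline.1)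
        else if xe.2 = '<' then mask.add (1 + PySem.Int.mod (xe.1 - time - 1) width, yline.1)
        else if xe.2 = '^' then mask.add (xe.1, 1 + PySem.Int.mod (yline.1 - time - 1) height)
        else if xe.2 = 'v' then mask.add (xe.1, 1 + PySem.Int.mod (yline.1 + time - 1) height)
        else mask) mask) mask
    = (((PySem.List.enumerate board s).flatMap (fun yl =>
        ((PySem.List.enumerate yl.2.toList 0).filter
          (fun xe => (['#', '>', '<', '^', 'v'] : List Char).contains xe.2)).map
          (fun xe => (xe.2, xe.1, yl.1)))).map (cgm_posA width height time)).foldl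
      (fun m e => PySem.Set.add m (e.2.1, e.2.2)) mask := by
  induction board generalizing s mask with
  | nil => simp [PySem.List.enumerate_nil]
  | cons line rest ih =>
    rw [PySem.List.enumerate_cons]
    simp only [List.flatMap_cons, List.map_append, List.foldl_cons, List.foldl_append]
    rw [cgm_line, ih]

-- the time loop: A recomputing at each time = B threading the stepped cell list
theorem cgm_loop (board : List String) (width height : Int) (k : Nat) :
    ∀ (t0 : Int) (ret : List (List (Int × Int))),
    (PySem.List.pyRange t0 (t0 + k) 1).foldl (fun ret time =>
      ret ++ [(PySem.List.enumerate board 0).foldl (fun mask yline =>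
        (PySem.List.enumerate yline.2.toList 0).foldl (fun mask xe =>
          if xe.2 = '#' then mask.add (xe.1, yline.1)
          else if xe.2 = '>' then mask.add (1 + PySem.Int.mod (xe.1 + time - 1) width, yline.1)
          else if xe.2 = '<' then mask.add (1 + PySem.Int.mod (xe.1 - time - 1) width, yline.1)
          else if xe.2 = '^' then mask.add (xe.1, 1 + PySem.Int.mod (yline.1 - time - 1) height)
          else if xe.2 = 'v' then mask.add (xe.1, 1 + PySem.Int.mod (yline.1 + time - 1) height)
          else mask) mask) (PySem.Set.empty : PySem.Set (Int × Int))]) ret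
    = ((PySem.List.pyRange t0 (t0 + k) 1).foldl (fun st _ =>
        (st.1 ++ [st.2.foldl (fun m e => PySem.Set.add m (e.2.1, e.2.2))
            (PySem.Set.empty : PySem.Set (Int × Int))],
         st.2.map (cgm_step width height)))
        (ret, (cgm_events board).map (cgm_posA width height t0))).1 := by
  induction k with
  | zero =>
    intro t0 ret
    simp only [Nat.cast_zero, add_zero]
    rw [PySem.List.pyRange_one_eq_nil (le_refl t0)]
    simp
  | succ m ih =>
    intro t0 ret
    rw [PySem.List.pyRange_one_cons (by push_cast; omega)]
    simp only [List.foldl_cons]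
    rw [cgm_board, List.map_map,
      show (cgm_step width height ∘ cgm_posA width height t0)
          = cgm_posA width height (t0 + 1) from funext (cgm_step_posA width height t0),
      show t0 + (((m + 1 : Nat)) : Int) = (t0 + 1) + (m : Int) by push_cast; ring]
    exact ih (t0 + 1) _

-- ===== VERDICT (by name: the statement is the Claim_ definition above) =====
theorem create_graph_masks_spec : Claim_equal_create_graph_masks := by
  intro board _ _
  show create_graph_masks board = create_graph_masks_alt board
  simp only [create_graph_masks, create_graph_masks_alt]
  rw [cgm_cells0_eq]
  generalize (PySem.Str.len (PySem.List.pyGetD board 0 "") - 2 : Int) = w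
  generalize ((board.length : Int) - 2 : Int) = h
  by_cases hn : w * h + 1 ≤ 0
  · rw [PySem.List.pyRange_one_eq_nil hn]
    simp
  · rw [show w * h + 1 = 0 + (((w * h + 1).toNat : Nat) : Int) by omega]
    exact cgm_loop board w h (w * h + 1).toNat 0 []
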